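-- pv_equiv track=rewrite | github.com/ishitab1310/beyond-words-genre | src/build_dataset.py | group_passages
-- ===== SOURCE A (Python) =====
-- def wc(t): return len(str(t).split())
--
-- def group_passages(texts, size=3, min_w=30):
--     """
--     Group list of short texts into passages.
--     size=3: 3 sentences × ~11 words = ~33 words > 30 minimum.
--     Use size=3 not 5 to maximise passage count from limited data.
--     """
--     out, buf = [], []
--     for t in texts:
--         t = t.strip()
--         if not t: continue
--         buf.append(t)
--         if len(buf) >= size:
--             p = " ".join(buf)
--             if wc(p) >= min_w: out.append(p)
--             buf = []
--     if buf:                                  # leftover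
--         p = " ".join(buf)
--         if wc(p) >= min_w: out.append(p)
--     return out
-- ===== SOURCE B (Python) =====
-- def wc(t): return len(str(t).split())
--
-- def group_passages(texts, size=3, min_w=30):
--     # Clean once, then consume the cleaned list size-at-a-time by slicing;
--     # the final partial slice is handled by the same step, no leftover branch.
--     cleaned = [s for s in (t.strip() for t in texts) if s]
--     out = []
--     while cleaned:
--         p = " ".join(cleaned[:size])
--         if wc(p) >= min_w:
--             out.append(p)
--         cleaned = cleaned[size:]
--     return out
-- ===== Notes on version B (the rewrite author's own statement) =====
-- stated objective: simpler
-- what changed: B filters/strips all texts in one pass and then consumes the cleaned list size-at-a-time by slicing, so the running buffer and the duplicated leftover branch disappear.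
-- outside the precondition, e.g. on group_passages(['hi'], -1, 0): A returns ['hi'], B does not finish within the time limit
import Mathlib
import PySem

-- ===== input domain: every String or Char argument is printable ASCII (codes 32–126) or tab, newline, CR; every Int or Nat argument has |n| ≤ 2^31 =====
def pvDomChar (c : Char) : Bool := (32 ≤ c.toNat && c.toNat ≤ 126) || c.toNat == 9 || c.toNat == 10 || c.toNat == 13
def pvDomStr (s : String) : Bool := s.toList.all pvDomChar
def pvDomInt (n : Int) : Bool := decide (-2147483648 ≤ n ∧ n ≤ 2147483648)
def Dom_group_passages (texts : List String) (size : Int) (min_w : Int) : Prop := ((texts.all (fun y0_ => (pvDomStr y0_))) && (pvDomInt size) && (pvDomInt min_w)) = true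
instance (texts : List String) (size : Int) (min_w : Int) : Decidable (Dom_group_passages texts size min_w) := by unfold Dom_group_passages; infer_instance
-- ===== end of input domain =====

-- B replaces A's running buffer + duplicated leftover branch by a one-pass clean-up
-- followed by size-at-a-time slicing of the cleaned list (objective: simpler).

-- ===== PORT A =====
-- wc(t) = len(str(t).split())   (t is always a str here, so str(t) = t)
def pvWc (t : String) : Int := ((PySem.Str.split₀ t).length : Int)

-- the body of A's for-loop: state = (out, buf)
def pvStepA (size min_w : Int) (st : List String × List String) (t : String) :
    List String × List String :=
  let t := PySem.Str.strip t
  if t = "" then st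
  else
    let buf := st.2 ++ [t]
    if (buf.length : Int) ≥ size then
      let p := PySem.Str.join " " buf
      (if pvWc p ≥ min_w then st.1 ++ [p] else st.1, ([] : List String))
    else (st.1, buf)

-- A's leftover branch after the loop
def pvFinishA (min_w : Int) (st : List String × List String) : List String :=
  if st.2 ≠ [] then
    let p := PySem.Str.join " " st.2
    if pvWc p ≥ min_w then st.1 ++ [p] else st.1
  else st.1

def group_passages (texts : List String) (size : Int) (min_w : Int) : List String :=
  pvFinishA min_w (texts.foldl (pvStepA size min_w) ([], []))

-- ===== PORT B =====
-- Source B's while-loop: emit cleaned[:size] (slice = take/drop, exact for size ≥ 1),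
-- then recurse on cleaned[size:].  For size ≤ 0 the Python loop diverges (outside
-- Pre_); the guard returning [] there exists only to make the recursion total.
def pvChunks (size min_w : Int) (cleaned : List String) : List String :=
  if cleaned = [] then []
  else if size ≤ 0 then []
  else
    let p := PySem.Str.join " " (cleaned.take size.toNat)
    (if pvWc p ≥ min_w then [p] else []) ++ pvChunks size min_w (cleaned.drop size.toNat)
termination_by cleaned.length
decreasing_by
  rename_i h1 h2
  have : 1 ≤ size.toNat := by omega
  have hl : cleaned.length ≠ 0 := by simpa using fun h => h1 (List.eq_nil_of_length_eq_zero h)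
  simp only [List.length_drop]; omega

def group_passages_alt (texts : List String) (size : Int) (min_w : Int) : List String :=
  -- cleaned = [s for s in (t.strip() for t in texts) if s]
  let cleaned := (texts.map PySem.Str.strip).filter (fun s => s ≠ "")
  pvChunks size min_w cleaned

-- ===== PRECONDITION & SPEC =====
-- Pre_ excludes size ≤ 0 combined with some non-blank text: there A degenerates to
-- per-element chunks while B's slice stepping makes no progress (the Python diverges).
def Pre_group_passages (texts : List String) (size : Int) (min_w : Int) : Prop :=
  1 ≤ size ∨ ∀ t ∈ texts, PySem.Str.strip t = ""
instance (texts : List String) (size : Int) (min_w : Int) : Decidable (Pre_group_passages texts size min_w) := by unfold Pre_group_passages; infer_instance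
def pvWitness_group_passages : List String × Int × Int := (["hello world", " foo ", "bar"], 2, 1)

def Spec_group_passages (texts : List String) (size : Int) (min_w : Int) (out : List String) : Prop := out = group_passages_alt texts size min_w
instance (texts : List String) (size : Int) (min_w : Int) (out : List String) : Decidable (Spec_group_passages texts size min_w out) := by unfold Spec_group_passages; infer_instance

-- ===== CLAIM (what is proved, stated in full; the proofs are below) =====
def Claim_equal_group_passages : Prop := ∀ (texts : List String) (size : Int) (min_w : Int), Dom_group_passages texts size min_w → Pre_group_passages texts size min_w → Spec_group_passages texts size min_w (group_passages texts size min_w)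

-- ===== LEMMAS AND PROOFS =====

-- folding A's step over texts = folding the strip-free step over the cleaned list
theorem pv_fold_clean (size min_w : Int) (texts : List String) (st : List String × List String) :
    texts.foldl (pvStepA size min_w) st =
      ((texts.map PySem.Str.strip).filter (fun s => s ≠ "")).foldl
        (fun st t =>
          let buf := st.2 ++ [t]
          if (buf.length : Int) ≥ size then
            let p := PySem.Str.join " " buf
            (if pvWc p ≥ min_w then st.1 ++ [p] else st.1, ([] : List String))
          else (st.1, buf)) st := by
  induction texts generalizing st with
  | nil => rfl
  | cons t ts ih =>
    by_cases h : PySem.Str.strip t = "" <;>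
      simp [List.foldl_cons, pvStepA, h, ih]

-- the buffer automaton, run over the cleaned list with a partial buffer, produces
-- exactly the size-at-a-time chunks of buf ++ cleaned
theorem pv_main (size min_w : Int) (cleaned : List String) :
    ∀ (out buf : List String), 1 ≤ size → (buf.length : Int) < size →
    pvFinishA min_w (cleaned.foldl
        (fun st t =>
          let b := st.2 ++ [t]
          if (b.length : Int) ≥ size then
            let p := PySem.Str.join " " b
            (if pvWc p ≥ min_w then st.1 ++ [p] else st.1, ([] : List String))
          else (st.1, b)) (out, buf)) =
      out ++ pvChunks size min_w (buf ++ cleaned) := by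
  induction cleaned with
  | nil =>
    intro out buf hs hb
    by_cases h : buf = []
    · subst h; simp [pvFinishA, pvChunks]
    · have htake : buf.take size.toNat = buf := List.take_of_length_le (by omega)
      have hdrop : buf.drop size.toNat = ([] : List String) :=
        List.drop_eq_nil_of_le (by omega)
      rw [List.foldl_nil]
      rw [pvChunks]
      simp only [List.append_nil, if_neg h, if_neg (by omega : ¬ size ≤ 0), htake, hdrop]
      rw [pvChunks]
      simp [pvFinishA, h]
      split <;> simp
  | cons t rest ih =>
    intro out buf hs hb
    rw [List.foldl_cons]
    simp only []
    by_cases h : ((buf ++ [t]).length : Int) ≥ size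
    · have hlen : (buf ++ [t]).length = size.toNat := by
        simp only [List.length_append, List.length_singleton] at h ⊢; omega
      rw [if_pos h]
      have hne : (buf ++ [t]) ++ rest ≠ [] := by simp
      conv_rhs => rw [show buf ++ t :: rest = (buf ++ [t]) ++ rest from by simp, pvChunks]
      rw [if_neg hne, if_neg (by omega : ¬ size ≤ 0),
        List.take_left' hlen, List.drop_left' hlen]
      have ihs := ih (if pvWc (PySem.Str.join " " (buf ++ [t])) ≥ min_w
          then out ++ [PySem.Str.join " " (buf ++ [t])] else out) [] hs
          (by simp only [List.length_nil, Int.natCast_zero]; omega)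
      simp only [List.nil_append] at ihs
      rw [ihs]
      split <;> simp [*]
    · rw [if_neg h]
      have ihs := ih out (buf ++ [t]) hs (by omega)
      rw [ihs, List.append_assoc]
      rfl

-- ===== VERDICT (by name: the statement is the Claim_ definition above) =====
theorem group_passages_spec : Claim_equal_group_passages := by
  intro texts size min_w _ hpre
  unfold Spec_group_passages group_passages group_passages_alt
  rcases hpre with hs | hall
  · rw [pv_fold_clean]
    have := pv_main size min_w ((texts.map PySem.Str.strip).filter (fun s => s ≠ "")) [] []
      hs (by simpa using hs)
    simpa using this
  · have hc : (texts.map PySem.Str.strip).filter (fun s => s ≠ "") = [] := by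
      rw [List.filter_eq_nil_iff]; simp_all
    rw [pv_fold_clean, hc]
    simp [pvFinishA, pvChunks]
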